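-- pv_equiv track=rewrite | github.com/antonieto/python-dfa | dfa/util.py | separateTokens
-- ===== SOURCE A (Python) =====
-- def separateTokens(lines):
--     tokens = []
--     for line in lines:
--         comment = None
--         if "//" in line:
--             index = line.find("//")
--             comment = line[index::]
--             s = line[:index]
--
--         else:
--             s = line
--         s = s.replace("*", f" * ")
--         s = s.replace("(", f" ( ")
--         s = s.replace(")", f" ) ")
--         s = s.replace("^", f" ^ ")
--         s = s.replace("=", f" = ")
--         s = s.split(" ")
--         for el in s:
--             if len(el) > 0:
--                 tokens += [el]
--         if comment:
--             tokens += [comment]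
--     return tokens
-- ===== SOURCE B (Python) =====
-- OPS = "*()^="
--
-- def separateTokens(lines):
--     tokens = []
--     for line in lines:
--         index = line.find("//")
--         if index >= 0:
--             comment = line[index:]
--             s = line[:index]
--         else:
--             comment = None
--             s = line
--         buf = []
--         for ch in s:
--             if ch in OPS:
--                 if buf:
--                     tokens.append("".join(buf))
--                     buf = []
--                 tokens.append(ch)
--             elif ch == " ":
--                 if buf:
--                     tokens.append("".join(buf))
--                     buf = []
--             else:
--                 buf.append(ch)
--         if buf:
--             tokens.append("".join(buf))
--         if comment:
--             tokens.append(comment)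
--     return tokens
-- ===== Notes on version B (the rewrite author's own statement) =====
-- stated objective: simpler
-- what changed: replaces the five whole-string .replace passes plus split(' ') plus non-empty filter with one single pass over the characters maintaining a current-token buffer (flush on operator or space)
import Mathlib
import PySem

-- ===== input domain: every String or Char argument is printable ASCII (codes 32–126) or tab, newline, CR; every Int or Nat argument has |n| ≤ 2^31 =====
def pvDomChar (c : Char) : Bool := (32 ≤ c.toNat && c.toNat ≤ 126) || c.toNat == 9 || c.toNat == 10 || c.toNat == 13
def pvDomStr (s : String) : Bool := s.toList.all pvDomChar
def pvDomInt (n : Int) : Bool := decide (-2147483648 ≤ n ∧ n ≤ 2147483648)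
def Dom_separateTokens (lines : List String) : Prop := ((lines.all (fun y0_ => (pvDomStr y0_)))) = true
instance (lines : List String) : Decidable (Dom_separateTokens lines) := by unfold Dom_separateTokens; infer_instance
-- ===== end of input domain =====

-- B replaces A's five whole-string replace passes + split(' ') + non-empty filter by a
-- single character pass with a current-token buffer (simpler decomposition; return value only).

-- ===== PORT A =====
def separateTokens (lines : List String) : List String :=
  lines.foldl (fun tokens line =>
    let cs := line.toList
    let sc : List Char × Option (List Char) :=
      if PySem.Chars.isIn "//".toList cs then
        let index := PySem.Chars.find cs "//".toList
        (PySem.List.slice cs none (some index), some (PySem.List.slice cs (some index) none))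
      else (cs, none)
    let s := sc.1
    let s := PySem.Chars.replace s "*".toList " * ".toList
    let s := PySem.Chars.replace s "(".toList " ( ".toList
    let s := PySem.Chars.replace s ")".toList " ) ".toList
    let s := PySem.Chars.replace s "^".toList " ^ ".toList
    let s := PySem.Chars.replace s "=".toList " = ".toList
    let parts := PySem.Chars.splitOn s " ".toList
    let tokens := parts.foldl (fun t el => if el.length > 0 then t ++ [String.ofList el] else t) tokens
    match sc.2 with
    | some c => if c.length > 0 then tokens ++ [String.ofList c] else tokens
    | none => tokens) []

-- ===== PORT B =====
def pvOps : List Char := "*()^=".toList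

-- the body of B's inner character loop (Source B's `for ch in s`)
def pvStepB (st : List String × List Char) (ch : Char) : List String × List Char :=
  if ch ∈ pvOps then
    ((if st.2 ≠ [] then st.1 ++ [String.ofList st.2] else st.1) ++ [String.ofList [ch]], [])
  else if ch = ' ' then
    (if st.2 ≠ [] then st.1 ++ [String.ofList st.2] else st.1, [])
  else (st.1, st.2 ++ [ch])

def separateTokens_alt (lines : List String) : List String :=
  lines.foldl (fun tokens line =>
    let cs := line.toList
    let index := PySem.Chars.find cs "//".toList
    let sc : List Char × Option (List Char) :=
      if 0 ≤ index then
        (PySem.List.slice cs none (some index), some (PySem.List.slice cs (some index) none))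
      else (cs, none)
    let st := sc.1.foldl pvStepB (tokens, [])
    let tokens := if st.2 ≠ [] then st.1 ++ [String.ofList st.2] else st.1
    match sc.2 with
    | some c => if c.length > 0 then tokens ++ [String.ofList c] else tokens
    | none => tokens) []

-- ===== PRECONDITION & SPEC =====
def Spec_separateTokens (lines : List String) (out : List String) : Prop := out = separateTokens_alt lines
instance (lines : List String) (out : List String) : Decidable (Spec_separateTokens lines out) := by unfold Spec_separateTokens; infer_instance

-- ===== CLAIM (what is proved, stated in full; the proofs are below) =====
def Claim_equal_separateTokens : Prop := ∀ (lines : List String), Dom_separateTokens lines → Spec_separateTokens lines (separateTokens lines)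

-- ===== LEMMAS AND PROOFS =====

-- what one character of the line becomes after A's five replace passes
def pvExpand (c : Char) : List Char := if c ∈ pvOps then [' ', c, ' '] else [c]

lemma pv_replace_go (a : Char) (new : List Char) :
    ∀ (s acc : List Char) (fuel : Nat), s.length ≤ fuel →
      PySem.Chars.replace.go [a] new fuel s acc
        = acc.reverse ++ s.flatMap (fun c => if c = a then new else [c]) := by
  intro s
  induction s with
  | nil =>
    intro acc fuel _
    cases fuel <;> simp [PySem.Chars.replace.go]
  | cons c t ih =>
    intro acc fuel h
    obtain ⟨f, rfl⟩ : ∃ f, fuel = f + 1 := ⟨fuel - 1, by simp at h; omega⟩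
    by_cases hc : c = a
    · subst hc
      simp only [PySem.Chars.replace.go, List.isPrefixOf, beq_self_eq_true, Bool.true_and, if_pos]
      rw [show List.drop [c].length (c :: t) = t from rfl,
        ih (new.reverse ++ acc) f (by simp at h ⊢; omega)]
      simp
    · have : ([a].isPrefixOf (c :: t)) = false := by
        simp [List.isPrefixOf]; exact fun hca => absurd hca.symm hc
      simp only [PySem.Chars.replace.go, this, Bool.false_eq_true, if_false]
      rw [ih (c :: acc) f (by simp at h ⊢; omega)]
      simp [hc]

lemma pv_replace_single (a : Char) (new s : List Char) :
    PySem.Chars.replace s [a] new = s.flatMap (fun c => if c = a then new else [c]) := by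
  rw [PySem.Chars.replace]
  simp only [List.isEmpty_cons, Bool.false_eq_true, if_false]
  exact pv_replace_go a new s [] s.length le_rfl

lemma pv_chain (s : List Char) :
    PySem.Chars.replace
      (PySem.Chars.replace
        (PySem.Chars.replace
          (PySem.Chars.replace
            (PySem.Chars.replace s "*".toList " * ".toList)
            "(".toList " ( ".toList)
          ")".toList " ) ".toList)
        "^".toList " ^ ".toList)
      "=".toList " = ".toList
    = s.flatMap pvExpand := by
  have h1 : "*".toList = ['*'] := rfl
  have h2 : "(".toList = ['('] := rfl
  have h3 : ")".toList = [')'] := rfl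
  have h4 : "^".toList = ['^'] := rfl
  have h5 : "=".toList = ['='] := rfl
  rw [h1, h2, h3, h4, h5, pv_replace_single, pv_replace_single, pv_replace_single,
    pv_replace_single, pv_replace_single]
  induction s with
  | nil => rfl
  | cons c t ih =>
    simp only [List.flatMap_cons, List.flatMap_append]
    rw [ih]
    congr 1
    by_cases e1 : c = '*'
    · subst e1; decide
    by_cases e2 : c = '('
    · subst e2; decide
    by_cases e3 : c = ')'
    · subst e3; decide
    by_cases e4 : c = '^'
    · subst e4; decide
    by_cases e5 : c = '='
    · subst e5; decide
    simp [e1, e2, e3, e4, e5, pvExpand, pvOps]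

lemma pv_find_go_cases (sub : List Char) :
    ∀ (s : List Char) (k : Nat), PySem.Chars.find.go sub s k = -1 ∨ (k : Int) ≤ PySem.Chars.find.go sub s k := by
  intro s
  induction s with
  | nil => intro k; by_cases h : sub.isEmpty <;> simp [PySem.Chars.find.go, h]
  | cons c t ih =>
    intro k
    by_cases h : sub.isPrefixOf (c :: t)
    · simp [PySem.Chars.find.go, h]
    · simp only [PySem.Chars.find.go, h, Bool.false_eq_true, if_false]
      rcases ih (k + 1) with h' | h'
      · exact Or.inl h'
      · right; omega

lemma pv_isIn_iff (s : List Char) :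
    PySem.Chars.isIn "//".toList s = true ↔ 0 ≤ PySem.Chars.find s "//".toList := by
  rcases pv_find_go_cases "//".toList s 0 with h | h <;>
    rw [show ("//".toList : List Char) = ['/', '/'] from rfl] at h
  · simp [PySem.Chars.isIn, PySem.Chars.find, h]
  · simp only [PySem.Chars.isIn, PySem.Chars.find, bne_iff_ne, ne_eq]
    constructor
    · intro _; exact h
    · intro _; omega

-- B's token list for one (comment-stripped) line, starting from buffer buf
def pvBtok : List Char → List Char → List (List Char)
  | [], buf => if buf = [] then [] else [buf]
  | c :: t, buf =>
    if c ∈ pvOps then (if buf = [] then [] else [buf]) ++ [c] :: pvBtok t []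
    else if c = ' ' then (if buf = [] then [] else [buf]) ++ pvBtok t []
    else pvBtok t (buf ++ [c])

lemma pv_foldlB : ∀ (s : List Char) (toks : List String) (buf : List Char),
    (if (List.foldl pvStepB (toks, buf) s).2 ≠ [] then
        (List.foldl pvStepB (toks, buf) s).1 ++ [String.ofList (List.foldl pvStepB (toks, buf) s).2]
      else (List.foldl pvStepB (toks, buf) s).1)
    = toks ++ (pvBtok s buf).map String.ofList := by
  intro s
  induction s with
  | nil =>
    intro toks buf
    by_cases h : buf = [] <;> simp [pvBtok, h]
  | cons c t ih =>
    intro toks buf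
    by_cases h1 : c ∈ pvOps
    · rw [show List.foldl pvStepB (toks, buf) (c :: t)
          = List.foldl pvStepB ((if buf ≠ [] then toks ++ [String.ofList buf] else toks) ++ [String.ofList [c]], []) t
        from by simp [pvStepB, h1]]
      rw [ih]
      by_cases h : buf = [] <;> simp [pvBtok, h1, h]
    · by_cases h2 : c = ' '
      · subst h2
        rw [show List.foldl pvStepB (toks, buf) (' ' :: t)
            = List.foldl pvStepB ((if buf ≠ [] then toks ++ [String.ofList buf] else toks), []) t
          from by simp [pvStepB, h1]]
        rw [ih]
        by_cases h : buf = [] <;> simp [pvBtok, h1, h]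
      · rw [show List.foldl pvStepB (toks, buf) (c :: t) = List.foldl pvStepB (toks, buf ++ [c]) t
          from by simp [pvStepB, h1, h2]]
        rw [ih]
        simp [pvBtok, h1, h2]

lemma pv_core : ∀ (s cur : List Char) (accs : List (List Char)) (fuel : Nat),
    (s.flatMap pvExpand).length + 1 ≤ fuel →
    (PySem.Chars.splitOn.go [' '] fuel (s.flatMap pvExpand) cur accs).filter (fun l => decide (0 < l.length))
      = accs.reverse.filter (fun l => decide (0 < l.length)) ++ pvBtok s cur.reverse := by
  intro s
  induction s with
  | nil =>
    intro cur accs fuel h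
    obtain ⟨f, rfl⟩ : ∃ f, fuel = f + 1 := ⟨fuel - 1, by omega⟩
    simp only [List.flatMap_nil, PySem.Chars.splitOn.go]
    by_cases hc : cur = [] <;> simp [pvBtok, hc, List.filter_append, List.length_pos_iff]
  | cons c t ih =>
    intro cur accs fuel h
    by_cases h1 : c ∈ pvOps
    · have he : pvExpand c = [' ', c, ' '] := by simp [pvExpand, h1]
      simp only [List.flatMap_cons, he, List.cons_append, List.nil_append] at h ⊢
      obtain ⟨f, rfl⟩ : ∃ f, fuel = f + 3 := ⟨fuel - 3, by simp at h; omega⟩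
      have hcs : c ≠ ' ' := by rintro rfl; simp [pvOps] at h1
      have hpre : ([' '].isPrefixOf (c :: ' ' :: (t.flatMap pvExpand))) = false := by
        simp [List.isPrefixOf]; exact fun hca => absurd hca.symm hcs
      rw [show f + 3 = (f + 2) + 1 from rfl,
        show PySem.Chars.splitOn.go [' '] (f + 2 + 1) (' ' :: c :: ' ' :: (t.flatMap pvExpand)) cur accs
          = PySem.Chars.splitOn.go [' '] (f + 2) (c :: ' ' :: (t.flatMap pvExpand)) [] (cur.reverse :: accs)
        from by simp [PySem.Chars.splitOn.go, List.isPrefixOf],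
        show f + 2 = (f + 1) + 1 from rfl,
        show PySem.Chars.splitOn.go [' '] (f + 1 + 1) (c :: ' ' :: (t.flatMap pvExpand)) [] (cur.reverse :: accs)
          = PySem.Chars.splitOn.go [' '] (f + 1) (' ' :: (t.flatMap pvExpand)) [c] (cur.reverse :: accs)
        from by simp only [PySem.Chars.splitOn.go, hpre, Bool.false_eq_true, if_false],
        show PySem.Chars.splitOn.go [' '] (f + 1) (' ' :: (t.flatMap pvExpand)) [c] (cur.reverse :: accs)
          = PySem.Chars.splitOn.go [' '] f (t.flatMap pvExpand) [] ([c] :: cur.reverse :: accs)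
        from by simp [PySem.Chars.splitOn.go, List.isPrefixOf]]
      rw [ih [] ([c] :: cur.reverse :: accs) f (by simp at h ⊢; omega)]
      by_cases hc : cur = [] <;> simp [pvBtok, h1, hc, List.filter_append, List.length_pos_iff]
    · by_cases h2 : c = ' '
      · subst h2
        have he : pvExpand ' ' = [' '] := by decide
        simp only [List.flatMap_cons, he, List.cons_append, List.nil_append] at h ⊢
        obtain ⟨f, rfl⟩ : ∃ f, fuel = f + 1 := ⟨fuel - 1, by omega⟩
        rw [show PySem.Chars.splitOn.go [' '] (f + 1) (' ' :: (t.flatMap pvExpand)) cur accs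
            = PySem.Chars.splitOn.go [' '] f (t.flatMap pvExpand) [] (cur.reverse :: accs)
          from by simp [PySem.Chars.splitOn.go, List.isPrefixOf]]
        rw [ih [] (cur.reverse :: accs) f (by simp at h ⊢; omega)]
        by_cases hc : cur = [] <;> simp [pvBtok, h1, hc, List.filter_append, List.length_pos_iff]
      · have he : pvExpand c = [c] := by simp [pvExpand, h1]
        simp only [List.flatMap_cons, he, List.cons_append, List.nil_append] at h ⊢
        obtain ⟨f, rfl⟩ : ∃ f, fuel = f + 1 := ⟨fuel - 1, by omega⟩
        have hpre : ([' '].isPrefixOf (c :: (t.flatMap pvExpand))) = false := by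
          simp [List.isPrefixOf]; exact fun hca => absurd hca.symm h2
        rw [show PySem.Chars.splitOn.go [' '] (f + 1) (c :: (t.flatMap pvExpand)) cur accs
            = PySem.Chars.splitOn.go [' '] f (t.flatMap pvExpand) (c :: cur) accs
          from by simp only [PySem.Chars.splitOn.go, hpre, Bool.false_eq_true, if_false]]
        rw [ih (c :: cur) accs f (by simp at h ⊢; omega)]
        simp [pvBtok, h1, h2]

-- the per-line core: A's expand/split/filter pipeline equals B's buffered pass
lemma pv_main (s : List Char) (tokens : List String) :
    (PySem.Chars.splitOn
        (PySem.Chars.replace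
          (PySem.Chars.replace
            (PySem.Chars.replace
              (PySem.Chars.replace
                (PySem.Chars.replace s "*".toList " * ".toList)
                "(".toList " ( ".toList)
              ")".toList " ) ".toList)
            "^".toList " ^ ".toList)
          "=".toList " = ".toList)
        " ".toList).foldl (fun t el => if el.length > 0 then t ++ [String.ofList el] else t) tokens
    = (if (List.foldl pvStepB (tokens, []) s).2 ≠ [] then
        (List.foldl pvStepB (tokens, []) s).1 ++ [String.ofList (List.foldl pvStepB (tokens, []) s).2]
      else (List.foldl pvStepB (tokens, []) s).1) := by
  rw [pv_chain, pv_foldlB]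
  rw [show (fun (t : List String) (el : List Char) => if el.length > 0 then t ++ [String.ofList el] else t)
      = (fun t el => if (fun (l : List Char) => decide (0 < l.length)) el = true then t ++ [String.ofList el] else t)
    from by funext t el; simp]
  rw [PySem.List.foldl_append_if]
  congr 1
  rw [show " ".toList = [' '] from rfl, PySem.Chars.splitOn]
  rw [pv_core (s := s) (cur := []) (accs := []) ((s.flatMap pvExpand).length + 1) le_rfl]
  rfl

-- ===== VERDICT (by name: the statement is the Claim_ definition above) =====
theorem separateTokens_spec : Claim_equal_separateTokens := by
  intro lines _
  unfold Spec_separateTokens separateTokens separateTokens_alt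
  apply List.foldl_ext
  intro tokens line _
  simp only []
  by_cases h : 0 ≤ PySem.Chars.find line.toList "//".toList
  · rw [if_pos ((pv_isIn_iff line.toList).mpr h), if_pos h, pv_main]
  · rw [if_neg (fun hh => h ((pv_isIn_iff line.toList).mp hh)), if_neg h, pv_main]
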